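-- pv_equiv track=rewrite | github.com/CharlesYu2000/lm-variation | compute/bert_compute_sent_probs.py | get_col_names
-- ===== SOURCE A (Python) =====
-- def get_col_names(num_cols):
--     if num_cols <= 0:
--         return None
--
--     varying = num_cols.bit_length()-1
--
--     if varying > 1:
--         smaller = get_col_names(int(num_cols/2))
--         return ['SG_' + x for x in smaller] + ['PL_' + x for x in smaller]
--     else:
--         return ['SG', 'PL']
-- ===== SOURCE B (Python) =====
-- def get_col_names(num_cols):
--     if num_cols <= 0:
--         return None
--     varying = num_cols.bit_length() - 1
--     k = varying if varying > 1 else 1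
--     return ['_'.join('PL' if (i >> j) & 1 else 'SG' for j in range(k - 1, -1, -1))
--             for i in range(2 ** k)]
-- ===== Notes on version B (the rewrite author's own statement) =====
-- stated objective: alternative
-- what changed: Replaces the recursive list-doubling (build result for num_cols/2, then prefix SG_/PL_ to each element) by a single flat enumeration: k = clamp(bit_length-1, >=1), then read each of the 2^k column names directly off the bits of an index i in range(2^k).
import Mathlib
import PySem

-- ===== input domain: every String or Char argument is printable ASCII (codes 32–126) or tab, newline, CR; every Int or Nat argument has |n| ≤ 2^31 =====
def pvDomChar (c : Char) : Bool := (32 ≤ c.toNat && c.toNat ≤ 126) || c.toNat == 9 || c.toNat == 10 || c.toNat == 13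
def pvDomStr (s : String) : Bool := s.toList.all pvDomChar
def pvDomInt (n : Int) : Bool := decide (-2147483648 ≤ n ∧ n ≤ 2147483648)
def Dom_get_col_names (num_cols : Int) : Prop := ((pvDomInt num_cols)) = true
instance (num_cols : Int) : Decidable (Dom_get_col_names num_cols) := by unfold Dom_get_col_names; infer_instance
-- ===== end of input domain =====

-- B replaces A's recursive list-doubling by a flat bit-indexed enumeration of all 2^k names (alternative decomposition, same cost).

-- ===== PORT A =====
-- int(num_cols/2) is true division + truncation: PySem.Int.truncdiv (exact on |num_cols| ≤ 2^31 < 2^53).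
-- The 'none' match arm is unreachable (the recursive argument is always ≥ 2), kept only to type the recursion.
def get_col_names (num_cols : Int) : Option (List String) :=
  if num_cols ≤ 0 then none
  else
    let varying := PySem.Int.bitLength num_cols - 1
    if varying > 1 then
      match get_col_names (PySem.Int.truncdiv num_cols 2) with
      | some smaller =>
          some (smaller.map (fun x => "SG_" ++ x) ++ smaller.map (fun x => "PL_" ++ x))
      | none => none
    else some ["SG", "PL"]
termination_by num_cols.toNat
decreasing_by
  · rename_i h _
    have h1 : 0 < num_cols := by omega
    rw [show PySem.Int.truncdiv num_cols 2 = num_cols / 2 from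
      Int.tdiv_eq_ediv_of_nonneg (by omega)]
    have : num_cols / 2 < num_cols := by omega
    exact (Int.toNat_lt_toNat h1).mpr this

-- ===== PORT B =====
-- range(k-1,-1,-1) is the Nat list [k-1, …, 0] = (List.range k).reverse (all its values are ≥ 0 here);
-- (i >> j) & 1 on the nonnegative i, j is Nat's '>>>', '&&&'.
def get_col_names_alt (num_cols : Int) : Option (List String) :=
  if num_cols ≤ 0 then none
  else
    let varying := PySem.Int.bitLength num_cols - 1
    let k := if varying > 1 then varying else 1
    some ((List.range (2 ^ k)).map (fun i =>
      PySem.Str.join "_" (((List.range k).reverse).map (fun j =>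
        if (i >>> j) &&& 1 = 1 then "PL" else "SG"))))

-- ===== PRECONDITION & SPEC =====
def Spec_get_col_names (num_cols : Int) (out : Option (List String)) : Prop := out = get_col_names_alt num_cols
instance (num_cols : Int) (out : Option (List String)) : Decidable (Spec_get_col_names num_cols out) := by unfold Spec_get_col_names; infer_instance

-- ===== CLAIM (what is proved, stated in full; the proofs are below) =====
def Claim_equal_get_col_names : Prop := ∀ (num_cols : Int), Dom_get_col_names num_cols → Spec_get_col_names num_cols (get_col_names num_cols)

-- ===== LEMMAS AND PROOFS =====

-- the common closed form: the column-name list for k varying tokens (J 0 = J 1, matching A's clamp)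
def J : Nat → List String
  | 0 => ["SG", "PL"]
  | 1 => ["SG", "PL"]
  | (v+2) => (J (v+1)).map (fun x => "SG_" ++ x) ++ (J (v+1)).map (fun x => "PL_" ++ x)

-- the inner comprehension of B
def comboB (k i : Nat) : List String :=
  ((List.range k).reverse).map (fun j => if (i >>> j) &&& 1 = 1 then "PL" else "SG")

lemma comboB_succ (m i : Nat) :
    comboB (m+1) i = (if (i >>> m) &&& 1 = 1 then "PL" else "SG") :: comboB m i := by
  simp [comboB, List.range_succ]

lemma shift_lo (m i : Nat) (hi : i < 2^m) : (i >>> m) &&& 1 = 0 := by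
  rw [Nat.shiftRight_eq_div_pow, Nat.div_eq_of_lt hi]
  rfl

lemma shift_hi (m i : Nat) (hi : i < 2^m) : ((2^m + i) >>> m) &&& 1 = 1 := by
  rw [Nat.shiftRight_eq_div_pow, Nat.and_one_is_mod]
  rw [show (2:Nat)^m + i = 2^m * 1 + i by ring]
  rw [Nat.mul_add_div (Nat.two_pow_pos m)]
  rw [Nat.div_eq_of_lt hi]

lemma comboB_add_pow (m i : Nat) : comboB m (2^m + i) = comboB m i := by
  unfold comboB
  apply List.map_congr_left
  intro j hj
  have hj' : j < m := by simpa using hj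
  obtain ⟨d, rfl⟩ : ∃ d, m = j + 1 + d := ⟨m - j - 1, by omega⟩
  have key : ((2^(j+1+d) + i) >>> j) &&& 1 = (i >>> j) &&& 1 := by
    rw [Nat.and_one_is_mod, Nat.and_one_is_mod,
        Nat.shiftRight_eq_div_pow, Nat.shiftRight_eq_div_pow]
    rw [show (2:Nat)^(j+1+d) + i = 2^j * (2 * 2^d) + i by ring]
    rw [Nat.mul_add_div (Nat.two_pow_pos j)]
    omega
  rw [key]

lemma join_SG (b : String) (l : List String) :
    PySem.Str.join "_" ("SG" :: b :: l) = "SG_" ++ PySem.Str.join "_" (b :: l) := by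
  rw [← String.toList_inj]
  simp [PySem.Str.toList_join, PySem.Chars.join_cons_cons]

lemma join_PL (b : String) (l : List String) :
    PySem.Str.join "_" ("PL" :: b :: l) = "PL_" ++ PySem.Str.join "_" (b :: l) := by
  rw [← String.toList_inj]
  simp [PySem.Str.toList_join, PySem.Chars.join_cons_cons]

lemma comboB_cons (k i : Nat) (hk : 1 ≤ k) : ∃ b l, comboB k i = b :: l := by
  obtain ⟨m, rfl⟩ := Nat.exists_eq_add_of_le hk
  rw [show 1 + m = m + 1 by omega, comboB_succ]
  exact ⟨_, _, rfl⟩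

lemma B_join_combo : ∀ k : Nat, 1 ≤ k →
    (List.range (2^k)).map (fun i => PySem.Str.join "_" (comboB k i)) = J k := by
  intro k hk
  induction k, hk using Nat.le_induction with
  | base => decide
  | succ k hk ih =>
    have hsplit : (2:Nat)^(k+1) = 2^k + 2^k := by ring
    rw [hsplit, List.range_add, List.map_append, List.map_map]
    have first : (List.range (2^k)).map (fun i => PySem.Str.join "_" (comboB (k+1) i)) =
        (J k).map (fun x => "SG_" ++ x) := by
      rw [← ih, List.map_map]
      apply List.map_congr_left
      intro i hi
      have hi' : i < 2^k := by simpa using hi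
      obtain ⟨b, l, hbl⟩ := comboB_cons k i hk
      simp only [Function.comp, comboB_succ, shift_lo k i hi', hbl]
      simpa using join_SG b l
    have second : (List.range (2^k)).map
        ((fun i => PySem.Str.join "_" (comboB (k+1) i)) ∘ (fun x => 2^k + x)) =
        (J k).map (fun x => "PL_" ++ x) := by
      rw [← ih, List.map_map]
      apply List.map_congr_left
      intro i hi
      have hi' : i < 2^k := by simpa using hi
      obtain ⟨b, l, hbl⟩ := comboB_cons k i hk
      simp only [Function.comp, comboB_succ, shift_hi k i hi', comboB_add_pow, hbl]
      simpa using join_PL b l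
    rw [first, second]
    obtain ⟨v, rfl⟩ := Nat.exists_eq_add_of_le hk
    rw [show 1 + v + 1 = v + 2 by omega, show 1 + v = v + 1 by omega]
    simp [J]

-- B_join_combo restated with the comprehension written out as in the port of B
lemma B_join (k : Nat) (hk : 1 ≤ k) :
    (List.range (2^k)).map (fun i =>
      PySem.Str.join "_" (((List.range k).reverse).map (fun j =>
        if (i >>> j) &&& 1 = 1 then "PL" else "SG"))) = J k := by
  simpa [comboB] using B_join_combo k hk

-- A computes the closed form J (bit_length - 1)
lemma A_closed_aux : ∀ N : Nat, ∀ n : Int, n.toNat ≤ N → 0 < n →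
    get_col_names n = some (J (PySem.Int.bitLength n - 1)) := by
  intro N
  induction N with
  | zero => intro n hN hn; omega
  | succ N ih =>
    intro n hN hn
    rw [get_col_names]
    rw [if_neg (by omega)]
    simp only []
    by_cases hv : PySem.Int.bitLength n - 1 > 1
    · rw [if_pos hv]
      have hbl : 3 ≤ PySem.Int.bitLength n := by omega
      have hn4 : 4 ≤ n := by
        have := PySem.Int.two_pow_bitLength_le n (by omega)
        have h4 : (4:Nat) ≤ 2 ^ (PySem.Int.bitLength n - 1) := by
          calc (4:Nat) = 2^2 := by norm_num
          _ ≤ 2 ^ (PySem.Int.bitLength n - 1) := Nat.pow_le_pow_right (by norm_num) (by omega)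
        omega
      have htd : PySem.Int.truncdiv n 2 = PySem.Int.floordiv n 2 := by
        rw [PySem.Int.floordiv_eq_ediv_of_pos (by norm_num)]
        exact Int.tdiv_eq_ediv_of_nonneg (by omega)
      have hfd : PySem.Int.floordiv n 2 = n / 2 :=
        PySem.Int.floordiv_eq_ediv_of_pos (by norm_num)
      have hpos2 : 0 < n / 2 := by omega
      have hrec := ih (PySem.Int.truncdiv n 2)
        (by rw [htd, hfd]; omega) (by rw [htd, hfd]; omega)
      rw [hrec]
      have hstep : PySem.Int.bitLength n =
          PySem.Int.bitLength (PySem.Int.truncdiv n 2) + 1 := by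
        rw [htd]; exact PySem.Int.bitLength_of_pos hn
      obtain ⟨v, hv'⟩ : ∃ v, PySem.Int.bitLength n = v + 3 :=
        ⟨PySem.Int.bitLength n - 3, by omega⟩
      rw [hstep] at hv'
      rw [show PySem.Int.bitLength (PySem.Int.truncdiv n 2) - 1 = v + 1 by omega,
          hstep, show PySem.Int.bitLength (PySem.Int.truncdiv n 2) + 1 - 1 = v + 2 by omega]
      rfl
    · rw [if_neg hv]
      have : PySem.Int.bitLength n - 1 = 0 ∨ PySem.Int.bitLength n - 1 = 1 := by omega
      rcases this with h | h <;> simp [J, h]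

-- ===== VERDICT (by name: the statement is the Claim_ definition above) =====
theorem get_col_names_spec : Claim_equal_get_col_names := by
  intro n _
  unfold Spec_get_col_names get_col_names_alt
  by_cases hn : n ≤ 0
  · rw [if_pos hn, get_col_names, if_pos hn]
  · rw [if_neg hn]
    rw [A_closed_aux n.toNat n le_rfl (by omega)]
    simp only
    set v := PySem.Int.bitLength n - 1 with hv
    by_cases h1 : v > 1
    · rw [if_pos h1]
      exact congrArg some (B_join v (by omega)).symm
    · rw [if_neg h1]
      refine congrArg some ?_
      rw [B_join 1 (by norm_num)]
      have : v = 0 ∨ v = 1 := by omega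
      rcases this with h | h <;> simp [J, h]
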